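-- pv_equiv track=rewrite | github.com/gkdis6/algorithm | 프로그래머스/2/42584. 주식가격/주식가격.py | solution
-- ===== SOURCE A (Python) =====
-- def solution(prices):
--     n = len(prices)
--     answer = [0] * n
--     stack = []
--
--     for i, price in enumerate(prices):
--         while stack and stack[-1][0] > price:
--             _, idx = stack.pop()
--             answer[idx] = i - idx
--         stack.append((price, i))
--
--     while stack:
--         _, idx = stack.pop()
--         answer[idx] = n - 1 - idx  # 끝까지 유지된 기간
--
--     return answer
-- ===== SOURCE B (Python) =====
-- def solution(prices):
--     answer = []
--     for i, p in enumerate(prices):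
--         c = 0
--         for q in prices[i+1:]:
--             c += 1
--             if q < p:
--                 break
--         answer.append(c)
--     return answer
-- ===== Notes on version B (the rewrite author's own statement) =====
-- stated objective: simpler
-- what changed: Replaces the monotonic stack with index bookkeeping and in-place answer updates by a plain forward scan from each position counting days until the first strictly smaller price.
import Mathlib
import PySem

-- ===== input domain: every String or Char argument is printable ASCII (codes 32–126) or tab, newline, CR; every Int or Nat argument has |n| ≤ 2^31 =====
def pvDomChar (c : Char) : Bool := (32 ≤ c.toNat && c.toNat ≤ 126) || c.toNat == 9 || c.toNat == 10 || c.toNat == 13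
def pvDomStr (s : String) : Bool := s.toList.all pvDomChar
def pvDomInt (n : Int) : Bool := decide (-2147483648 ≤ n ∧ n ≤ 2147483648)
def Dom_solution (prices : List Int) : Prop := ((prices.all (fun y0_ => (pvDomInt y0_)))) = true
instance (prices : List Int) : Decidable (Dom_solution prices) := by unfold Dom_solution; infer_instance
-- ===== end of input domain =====

-- B replaces A's monotonic stack and in-place index updates by a plain forward scan
-- from each position counting days until the first strictly smaller price (simpler, not faster).

-- ===== PORT A =====
-- enumerate(prices), starting at index i
def enumF (i : Nat) : List Int → List (Nat × Int)
  | [] => []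
  | x :: xs => (i, x) :: enumF (i + 1) xs

-- the inner `while stack and stack[-1][0] > price` loop (stack head = Python stack top)
def drainA (price : Int) (i : Nat) (ans : List Int) (stk : List (Int × Nat)) :
    List Int × List (Int × Nat) :=
  match stk with
  | [] => (ans, [])
  | (p, idx) :: rest =>
    if p > price then drainA price i (ans.set idx ((i : Int) - (idx : Int))) rest
    else (ans, (p, idx) :: rest)

-- the `for i, price in enumerate(prices)` loop
def mainA : List (Nat × Int) → List Int × List (Int × Nat) → List Int × List (Int × Nat)
  | [], st => st
  | (i, price) :: rest, (ans, stk) =>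
    let st' := drainA price i ans stk
    mainA rest (st'.1, (price, i) :: st'.2)

-- the final `while stack` loop
def finA (n : Nat) : List (Int × Nat) → List Int → List Int
  | [], ans => ans
  | (_, idx) :: rest, ans => finA n rest (ans.set idx ((n : Int) - 1 - (idx : Int)))

def solution (prices : List Int) : List Int :=
  let n := prices.length
  let st := mainA (enumF 0 prices) (List.replicate n 0, [])
  finA n st.2 st.1

-- ===== PORT B =====
-- the inner `for q in prices[i+1:]` loop of B: count days until the first q < p (inclusive)
def countB (p : Int) : List Int → Int
  | [] => 0
  | q :: rest => if q < p then 1 else 1 + countB p rest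

-- the outer `for i, p in enumerate(prices)` loop of B, walking the suffixes
def altGo : List Int → List Int
  | [] => []
  | p :: rest => countB p rest :: altGo rest

def solution_alt (prices : List Int) : List Int := altGo prices

-- ===== PRECONDITION & SPEC =====
def Spec_solution (prices : List Int) (out : List Int) : Prop := out = solution_alt prices
instance (prices : List Int) (out : List Int) : Decidable (Spec_solution prices out) := by unfold Spec_solution; infer_instance

-- ===== CLAIM (what is proved, stated in full; the proofs are below) =====
def Claim_equal_solution : Prop := ∀ (prices : List Int), Dom_solution prices → Spec_solution prices (solution prices)

-- ===== LEMMAS AND PROOFS =====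

-- the intended value of answer[j]
def specv (P : List Int) (j : Nat) : Int := countB (P.getD j 0) (P.drop (j + 1))

-- j's price has not strictly dropped on any day in (j, i)
def surv (P : List Int) (j i : Nat) : Prop := ∀ k, j < k → k < i → P.getD j 0 ≤ P.getD k 0

def InvA (P : List Int) (i : Nat) (st : List Int × List (Int × Nat)) : Prop :=
  st.1.length = P.length ∧
  (∀ j, j < P.length → j < i → ¬ surv P j i → st.1.getD j 0 = specv P j) ∧
  (∀ j, j < P.length → (i ≤ j ∨ surv P j i) → st.1.getD j 0 = 0) ∧
  (∀ q ∈ st.2, q.1 = P.getD q.2 0 ∧ q.2 < i ∧ surv P q.2 i) ∧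
  (∀ j, j < i → surv P j i → (P.getD j 0, j) ∈ st.2) ∧
  st.2.Pairwise (fun a b => b.1 ≤ a.1)

lemma countB_first (p : Int) (l : List Int) (t : Nat) (ht : t < l.length)
    (hlt : l.getD t 0 < p) (hge : ∀ m, m < t → p ≤ l.getD m 0) :
    countB p l = (t : Int) + 1 := by
  induction l generalizing t with
  | nil => simp at ht
  | cons x xs ih =>
    cases t with
    | zero => simp [countB] at hlt ⊢; simp [hlt]
    | succ t =>
      have hx : ¬ x < p := by have := hge 0 (by omega); simp at this; omega
      simp only [countB, if_neg hx]
      rw [ih t (by simpa using ht) (by simpa using hlt)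
        (fun m hm => by simpa using hge (m + 1) (by omega))]
      push_cast; ring

lemma countB_none (p : Int) (l : List Int)
    (hge : ∀ m, m < l.length → p ≤ l.getD m 0) :
    countB p l = (l.length : Int) := by
  induction l with
  | nil => simp [countB]
  | cons x xs ih =>
    have hx : ¬ x < p := by have := hge 0 (by simp); simp at this; omega
    simp only [countB, if_neg hx]
    rw [ih (fun m hm => by simpa using hge (m + 1) (by simpa using hm))]
    simp only [List.length_cons]; push_cast; ring

lemma getD_drop (l : List Int) (n m : Nat) (h : n + m < l.length) :
    (l.drop n).getD m 0 = l.getD (n + m) 0 := by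
  simp [List.getD_eq_getElem?_getD, List.getElem?_drop]

-- specv for an element that survives to i and drops exactly at day i
lemma specv_drop (P : List Int) (j i : Nat) (hj : j < i) (hi : i < P.length)
    (hs : surv P j i) (hlt : P.getD i 0 < P.getD j 0) :
    specv P j = (i : Int) - (j : Int) := by
  unfold specv
  have h1 : (P.drop (j + 1)).getD (i - (j + 1)) 0 < P.getD j 0 := by
    rw [getD_drop _ _ _ (by omega)]
    have he : j + 1 + (i - (j + 1)) = i := by omega
    rw [he]; exact hlt
  rw [countB_first (P.getD j 0) (P.drop (j + 1)) (i - (j + 1))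
    (by simp [List.length_drop]; omega) h1
    (fun m hm => by
      rw [getD_drop _ _ _ (by omega)]
      exact hs (j + 1 + m) (by omega) (by omega))]
  omega

-- specv for an element that survives to the end
lemma specv_surv (P : List Int) (j : Nat) (hj : j < P.length) (hs : surv P j P.length) :
    specv P j = (P.length : Int) - 1 - (j : Int) := by
  unfold specv
  rw [countB_none (P.getD j 0) (P.drop (j + 1)) (fun m hm => by
    rw [getD_drop _ _ _ (by simp [List.length_drop] at hm; omega)]
    exact hs (j + 1 + m) (by omega) (by simp [List.length_drop] at hm; omega))]
  simp [List.length_drop]; omega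

lemma drainA_snd (price : Int) (i : Nat) (ans : List Int) (stk : List (Int × Nat)) :
    (drainA price i ans stk).2 = stk.dropWhile (fun q => decide (q.1 > price)) := by
  induction stk generalizing ans with
  | nil => simp [drainA]
  | cons q rest ih =>
    obtain ⟨p, idx⟩ := q
    by_cases h : p > price
    · simp [drainA, List.dropWhile, h, ih]
    · simp [drainA, List.dropWhile, h]

lemma drainA_fst_length (price : Int) (i : Nat) (ans : List Int) (stk : List (Int × Nat)) :
    (drainA price i ans stk).1.length = ans.length := by
  induction stk generalizing ans with
  | nil => simp [drainA]
  | cons q rest ih =>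
    obtain ⟨p, idx⟩ := q
    by_cases h : p > price
    · simp [drainA, h, ih]
    · simp [drainA, h]

lemma drainA_fst_getD (price : Int) (i : Nat) (ans : List Int) (stk : List (Int × Nat))
    (j : Nat) (hj : j < ans.length) :
    (drainA price i ans stk).1.getD j 0 =
      if (stk.takeWhile (fun q => decide (q.1 > price))).any (fun q => q.2 == j)
      then (i : Int) - (j : Int) else ans.getD j 0 := by
  induction stk generalizing ans with
  | nil => simp [drainA]
  | cons q rest ih =>
    obtain ⟨p, idx⟩ := q
    by_cases h : p > price
    · rw [show drainA price i ans ((p, idx) :: rest)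
          = drainA price i (ans.set idx ((i : Int) - (idx : Int))) rest by simp [drainA, h]]
      rw [ih _ (by simpa using hj)]
      simp only [List.takeWhile, h, decide_true, List.any_cons]
      by_cases hr : rest.takeWhile (fun q => decide (q.1 > price)) |>.any (fun q => q.2 == j)
      · simp [hr]
      · by_cases hij : idx = j
        · subst hij; simp [hr, List.getD_eq_getElem?_getD, hj]
        · simp [hr, hij]
    · simp [drainA, h, List.takeWhile]

lemma finA_length (n : Nat) (stk : List (Int × Nat)) (ans : List Int) :
    (finA n stk ans).length = ans.length := by
  induction stk generalizing ans with
  | nil => simp [finA]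
  | cons q rest ih =>
    obtain ⟨p, idx⟩ := q
    simp [finA, ih]

lemma finA_getD (n : Nat) (stk : List (Int × Nat)) (ans : List Int)
    (j : Nat) (hj : j < ans.length) :
    (finA n stk ans).getD j 0 =
      if stk.any (fun q => q.2 == j) then (n : Int) - 1 - (j : Int) else ans.getD j 0 := by
  induction stk generalizing ans with
  | nil => simp [finA]
  | cons q rest ih =>
    obtain ⟨p, idx⟩ := q
    rw [show finA n ((p, idx) :: rest) ans
        = finA n rest (ans.set idx ((n : Int) - 1 - (idx : Int))) by simp [finA]]
    rw [ih _ (by simpa using hj)]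
    simp only [List.any_cons]
    by_cases hr : rest.any (fun q => q.2 == j)
    · simp [hr]
    · by_cases hij : idx = j
      · subst hij; simp [hr, List.getD_eq_getElem?_getD, hj]
      · simp [hr, hij]

lemma surv_mono (P : List Int) (j i1 i2 : Nat) (h : i1 ≤ i2) (hs : surv P j i2) :
    surv P j i1 := fun k h1 h2 => hs k h1 (by omega)

lemma surv_succ_self (P : List Int) (i : Nat) : surv P i (i + 1) :=
  fun k h1 h2 => by omega

lemma surv_succ_of (P : List Int) (j i : Nat) (hs : surv P j i)
    (hle : P.getD j 0 ≤ P.getD i 0) : surv P j (i + 1) := by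
  intro k h1 h2
  by_cases hk : k = i
  · subst hk; exact hle
  · exact hs k h1 (by omega)

-- every element left after the pops is at most the new price (needs the stack monotone)
lemma dw_le (x : Int) (stk : List (Int × Nat))
    (hp : stk.Pairwise (fun a b => b.1 ≤ a.1)) :
    ∀ q ∈ stk.dropWhile (fun q => decide (q.1 > x)), q.1 ≤ x := by
  induction stk with
  | nil => simp
  | cons a rest ih =>
    intro q hq
    rw [List.dropWhile_cons] at hq
    by_cases h : a.1 > x
    · simp only [h, decide_true, if_true] at hq
      exact ih (List.pairwise_cons.mp hp).2 q hq
    · simp only [h, decide_false] at hq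
      rcases List.mem_cons.mp hq with hqa | hqr
      · subst hqa; omega
      · have := (List.pairwise_cons.mp hp).1 q hqr; omega

lemma mainA_inv (P : List Int) (l : List Int) : ∀ (i : Nat) (st : List Int × List (Int × Nat)),
    P.drop i = l → i ≤ P.length → InvA P i st →
    InvA P P.length (mainA (enumF i l) st) := by
  induction l with
  | nil =>
    intro i st hd hle hinv
    have hlen : P.length ≤ i := by
      have := congrArg List.length hd; simp at this; omega
    have : i = P.length := by omega
    subst this
    simpa [enumF, mainA] using hinv
  | cons x xs ih =>
    intro i st hd hle hinv
    obtain ⟨ans, stk⟩ := st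
    have hi : i < P.length := by
      have := congrArg List.length hd; simp at this; omega
    have hx : P.getD i 0 = x := by
      have h0 : (P.drop i).getD 0 0 = x := by rw [hd]; rfl
      rwa [getD_drop _ _ _ (by omega)] at h0
    have hxs : P.drop (i + 1) = xs := by
      have := congrArg (List.drop 1) hd
      simpa [List.drop_drop, Nat.add_comm] using this
    obtain ⟨hL, hA1, hA2, hS1, hS2, hS3⟩ := hinv
    have hsplit : stk.takeWhile (fun q => decide (q.1 > x))
        ++ stk.dropWhile (fun q => decide (q.1 > x)) = stk :=
      List.takeWhile_append_dropWhile
    have hdw_le : ∀ q ∈ stk.dropWhile (fun q => decide (q.1 > x)), q.1 ≤ x := dw_le x stk hS3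
    have hmemtw : ∀ q ∈ stk.takeWhile (fun q => decide (q.1 > x)), q ∈ stk ∧ q.1 > x := by
      intro q hq
      refine ⟨(List.takeWhile_sublist _).mem hq, ?_⟩
      have := List.mem_takeWhile_imp hq; simpa using this
    have hmemdw : ∀ q ∈ stk.dropWhile (fun q => decide (q.1 > x)), q ∈ stk :=
      fun q hq => (List.dropWhile_sublist _).mem hq
    have hstep : mainA (enumF i (x :: xs)) (ans, stk)
        = mainA (enumF (i + 1) xs)
            ((drainA x i ans stk).1, (x, i) :: (drainA x i ans stk).2) := rfl
    rw [hstep]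
    apply ih (i + 1) _ hxs (by omega)
    rw [drainA_snd]
    refine ⟨by rw [drainA_fst_length]; exact hL, ?_, ?_, ?_, ?_, ?_⟩
    · -- A1: popped or previously finished entries carry specv
      intro j hj hji1 hns
      rw [drainA_fst_getD x i ans stk j (by rw [hL]; exact hj)]
      by_cases hany : (stk.takeWhile (fun q => decide (q.1 > x))).any (fun q => q.2 == j)
      · rw [if_pos hany]
        obtain ⟨q, hqtw, hqj⟩ := List.any_eq_true.mp hany
        have hqj : q.2 = j := by simpa using hqj
        obtain ⟨hqstk, hqgt⟩ := hmemtw q hqtw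
        obtain ⟨hq1, hq2, hq3⟩ := hS1 q hqstk
        rw [hqj] at hq1 hq2 hq3
        exact (specv_drop P j i hq2 hi hq3 (by rw [hx, ← hq1]; exact hqgt)).symm
      · rw [if_neg hany]
        by_cases hji : j < i
        · refine hA1 j hj hji ?_
          intro hs
          have hgt : x < P.getD j 0 := by
            by_contra hle'
            exact hns (surv_succ_of P j i hs (by rw [hx]; omega))
          have hmem := hS2 j hji hs
          rcases (List.mem_append.mp (hsplit ▸ hmem)) with htw | hdw
          · exact absurd (List.any_eq_true.mpr ⟨_, htw, by simp⟩) hany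
          · have h2 : P.getD j 0 ≤ x := hdw_le _ hdw
            omega
        · have hji' : j = i := by omega
          subst hji'
          exact absurd (surv_succ_self P j) hns
    · -- A2: untouched entries stay 0
      intro j hj hcase
      rw [drainA_fst_getD x i ans stk j (by rw [hL]; exact hj)]
      have hnotany : ¬ (stk.takeWhile (fun q => decide (q.1 > x))).any (fun q => q.2 == j) = true := by
        intro hany
        obtain ⟨q, hqtw, hqj⟩ := List.any_eq_true.mp hany
        have hqj : q.2 = j := by simpa using hqj
        obtain ⟨hqstk, hqgt⟩ := hmemtw q hqtw
        obtain ⟨hq1, hq2, hq3⟩ := hS1 q hqstk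
        rw [hqj] at hq1 hq2
        rcases hcase with hge | hs
        · omega
        · have := hs i (by omega) (by omega)
          rw [hx] at this; rw [hq1] at hqgt; omega
      rw [if_neg hnotany]
      refine hA2 j hj ?_
      rcases hcase with hge | hs
      · left; omega
      · right; exact surv_mono P j i (i + 1) (by omega) hs
    · -- S1: every stack entry survives
      intro q hq
      rcases List.mem_cons.mp hq with hqh | hqdw
      · subst hqh
        exact ⟨hx.symm, by omega, surv_succ_self P i⟩
      · obtain ⟨hq1, hq2, hq3⟩ := hS1 q (hmemdw q hqdw)
        refine ⟨hq1, by omega, surv_succ_of P q.2 i hq3 ?_⟩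
        rw [hx, ← hq1]; exact hdw_le q hqdw
    · -- S2: every survivor is on the stack
      intro j hj hs
      by_cases hji : j = i
      · subst hji; rw [hx]; exact List.mem_cons_self
      · have hji' : j < i := by omega
        have hmem := hS2 j hji' (surv_mono P j i (i + 1) (by omega) hs)
        rcases (List.mem_append.mp (hsplit ▸ hmem)) with htw | hdw
        · exfalso
          have hqgt : x < P.getD j 0 := (hmemtw _ htw).2
          have := hs i (by omega) (by omega)
          rw [hx] at this; omega
        · exact List.mem_cons_of_mem _ hdw
    · -- S3: the stack stays monotone
      refine List.pairwise_cons.mpr ⟨?_, List.Pairwise.sublist (List.dropWhile_sublist _) hS3⟩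
      intro q hq
      exact hdw_le q hq

lemma altGo_map (P : List Int) :
    altGo P = (List.range P.length).map (specv P) := by
  induction P with
  | nil => simp [altGo]
  | cons p rest ih =>
    have hspec : ∀ j, specv (p :: rest) (j + 1) = specv rest j := by
      intro j; simp [specv]
    simp only [altGo, List.length_cons, List.range_succ_eq_map, List.map_cons, List.map_map]
    refine congrArg₂ _ ?_ ?_
    · simp [specv]
    · rw [ih]
      exact (List.map_congr_left (fun j _ => (hspec j).symm)).symm

-- ===== VERDICT (by name: the statement is the Claim_ definition above) =====
theorem solution_spec : Claim_equal_solution := by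
  unfold Claim_equal_solution
  intro P _
  unfold Spec_solution solution solution_alt
  have hinv0 : InvA P 0 (List.replicate P.length 0, []) := by
    refine ⟨by simp, ?_, ?_, by simp, ?_, by simp⟩
    · intro j hj hji; omega
    · intro j hj _
      simp [List.getD_eq_getElem?_getD, hj]
    · intro j hj _; omega
  have hinv := mainA_inv P P 0 (List.replicate P.length 0, []) (by simp) (by omega) hinv0
  obtain ⟨hL, hA1, hA2, hS1, hS2, hS3⟩ := hinv
  rw [altGo_map]
  apply List.ext_getElem
  · rw [finA_length, hL]; simp
  · intro j h1 h2
    have hj : j < P.length := by simpa using h2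
    rw [List.getElem_map, List.getElem_range]
    rw [← List.getD_eq_getElem _ 0, finA_getD _ _ _ j (by rw [hL]; exact hj)]
    by_cases hany : (mainA (enumF 0 P) (List.replicate P.length 0, [])).2.any (fun q => q.2 == j)
    · rw [if_pos hany]
      obtain ⟨q, hqmem, hqj⟩ := List.any_eq_true.mp hany
      have hqj : q.2 = j := by simpa using hqj
      obtain ⟨_, _, hq3⟩ := hS1 q hqmem
      rw [hqj] at hq3
      exact (specv_surv P j hj hq3).symm
    · rw [if_neg hany]
      have hns : ¬ surv P j P.length := by
        intro hs
        exact hany (List.any_eq_true.mpr ⟨_, hS2 j hj hs, by simp⟩)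
      exact hA1 j hj hj hns
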